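-- pv_equiv track=rewrite | github.com/yjsong22/TempVS | process_data/data_filters.py | clean_repeated_parts
-- ===== SOURCE A (Python) =====
-- def clean_repeated_parts(sentences):
--     sentences = [s.strip().lower() for s in sentences]
--     cleaned_sentences = []
--
--     for i, current_sentence in enumerate(sentences):
--         if i == 0:
--             cleaned_sentences.append(current_sentence)
--         else:
--             current_sub_sentences = [s.strip() for s in current_sentence.split('.') if s.strip()]
--             cleaned_sub_sentences = []
--
--             for sub_sentence in current_sub_sentences:
--                 is_repeated = False
--                 for prev_sentence in sentences[:i]:
--                     prev_sub_sentences = [s.strip() for s in prev_sentence.split('.') if s.strip()]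
--                     if any(sub_sentence == prev_sub for prev_sub in prev_sub_sentences):
--                         is_repeated = True
--                         break
--
--                 if not is_repeated:
--                     cleaned_sub_sentences.append(sub_sentence)
--
--             cleaned_sentence = '. '.join(cleaned_sub_sentences)
--             if cleaned_sentence:
--                 cleaned_sentences.append(cleaned_sentence + '.')
--
--     return cleaned_sentences
-- ===== SOURCE B (Python) =====
-- def clean_repeated_parts(sentences):
--     norm = [s.strip().lower() for s in sentences]
--     if not norm:
--         return []
--
--     def subs(sentence):
--         return [p for p in (q.strip() for q in sentence.split('.')) if p]
--
--     out = [norm[0]]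
--     seen = set(subs(norm[0]))
--     for cur in norm[1:]:
--         parts = subs(cur)
--         fresh = [p for p in parts if p not in seen]
--         seen.update(parts)
--         if fresh:
--             out.append('. '.join(fresh) + '.')
--     return out
-- ===== Notes on version B (the rewrite author's own statement) =====
-- stated objective: faster
-- what changed: Replaces the nested rescan (for every sub-sentence, re-split and re-scan all earlier sentences) with a single pass that maintains one accumulated set of all sub-sentences seen so far.
import Mathlib
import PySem

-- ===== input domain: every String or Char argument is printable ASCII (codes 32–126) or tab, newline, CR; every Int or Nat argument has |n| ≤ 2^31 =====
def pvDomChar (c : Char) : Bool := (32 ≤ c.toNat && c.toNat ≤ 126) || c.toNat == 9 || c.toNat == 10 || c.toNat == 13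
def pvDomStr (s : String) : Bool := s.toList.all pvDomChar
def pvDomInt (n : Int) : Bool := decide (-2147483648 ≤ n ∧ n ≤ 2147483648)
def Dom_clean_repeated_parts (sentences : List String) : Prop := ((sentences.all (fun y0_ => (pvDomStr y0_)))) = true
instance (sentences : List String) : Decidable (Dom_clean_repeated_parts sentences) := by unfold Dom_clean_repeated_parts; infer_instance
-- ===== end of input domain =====

-- B replaces A's nested rescan of all earlier sentences (per sub-sentence) with one
-- pass that carries an accumulated set of every sub-sentence seen so far (objective: faster).

-- ===== PORT A =====
-- [s.strip() for s in sentence.split('.') if s.strip()]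
def subsA (sentence : String) : List String :=
  ((PySem.Str.split? sentence ".").getD []).filterMap (fun q =>
    if PySem.Str.strip q = "" then none else some (PySem.Str.strip q))

-- body of A's 'for i, current_sentence in enumerate(sentences)' loop
def aStep (sents : List String) (cleaned : List String) (ic : Int × String) : List String :=
  let i := ic.1
  let current_sentence := ic.2
  if i = 0 then cleaned ++ [current_sentence]
  else
    let current_sub_sentences := subsA current_sentence
    let cleaned_sub_sentences := current_sub_sentences.filter (fun sub_sentence =>
      ! (PySem.List.slice sents none (some i)).any (fun prev_sentence =>
          (subsA prev_sentence).any (fun prev_sub => sub_sentence == prev_sub)))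
    let cleaned_sentence := PySem.Str.join ". " cleaned_sub_sentences
    if cleaned_sentence = "" then cleaned
    else cleaned ++ [cleaned_sentence ++ "."]

def clean_repeated_parts (sentences : List String) : List String :=
  let sents := sentences.map (fun s => PySem.Str.lower (PySem.Str.strip s))
  (PySem.List.enumerate sents).foldl (aStep sents) []

-- ===== PORT B =====
def subsB (sentence : String) : List String :=
  ((PySem.Str.split? sentence ".").getD []).filterMap (fun q =>
    if PySem.Str.strip q = "" then none else some (PySem.Str.strip q))

def cleanLoopB (seen : PySem.Set String) (rest : List String) (out : List String) : List String :=
  match rest with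
  | [] => out
  | cur :: rest' =>
    let parts := subsB cur
    let fresh := parts.filter (fun p => ! PySem.Set.contains seen p)
    cleanLoopB (PySem.Set.update seen parts) rest'
      (if fresh.isEmpty then out else out ++ [PySem.Str.join ". " fresh ++ "."])

def clean_repeated_parts_alt (sentences : List String) : List String :=
  match sentences.map (fun s => PySem.Str.lower (PySem.Str.strip s)) with
  | [] => []
  | first :: rest => cleanLoopB (PySem.Set.ofList (subsB first)) rest [first]

-- ===== PRECONDITION & SPEC =====
def Spec_clean_repeated_parts (sentences : List String) (out : List String) : Prop := out = clean_repeated_parts_alt sentences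
instance (sentences : List String) (out : List String) : Decidable (Spec_clean_repeated_parts sentences out) := by unfold Spec_clean_repeated_parts; infer_instance

-- ===== CLAIM (what is proved, stated in full; the proofs are below) =====
def Claim_equal_clean_repeated_parts : Prop := ∀ (sentences : List String), Dom_clean_repeated_parts sentences → Spec_clean_repeated_parts sentences (clean_repeated_parts sentences)

-- ===== LEMMAS AND PROOFS =====

lemma mem_subsA_ne_empty {s p : String} (h : p ∈ subsA s) : p ≠ "" := by
  simp only [subsA, List.mem_filterMap] at h
  obtain ⟨q, -, hq⟩ := h
  by_cases he : PySem.Str.strip q = "" <;> simp [he] at hq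
  exact hq ▸ he

lemma toList_ne_nil_of_ne_empty {s : String} (h : s ≠ "") : s.toList ≠ [] := by
  intro hn
  exact h (String.toList_eq_nil_iff.mp hn)

lemma join_ne_empty {l : List String} (h : l ≠ []) (h2 : ∀ p ∈ l, p ≠ "") :
    PySem.Str.join ". " l ≠ "" := by
  intro hjoin
  have := congrArg String.toList hjoin
  rw [PySem.Str.toList_join] at this
  match l with
  | [] => exact h rfl
  | [a] =>
      rw [List.map_cons, List.map_nil, PySem.Chars.join_singleton] at this
      exact toList_ne_nil_of_ne_empty (h2 a (by simp)) this
  | a :: b :: t =>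
      rw [List.map_cons, List.map_cons, PySem.Chars.join_cons_cons] at this
      have ha := toList_ne_nil_of_ne_empty (h2 a (by simp))
      cases hA : a.toList with
      | nil => exact ha hA
      | cons c cs => rw [hA] at this; simp at this

lemma join_empty_iff {l : List String} (h2 : ∀ p ∈ l, p ≠ "") :
    (PySem.Str.join ". " l = "") ↔ l = [] := by
  constructor
  · intro hj
    by_contra hne
    exact join_ne_empty hne h2 hj
  · rintro rfl; rfl

lemma subsB_eq_subsA : subsB = subsA := rfl

lemma loop_eq (sents : List String) :
    ∀ (rest : List String) (k : Nat) (seen : PySem.Set String) (out : List String),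
      1 ≤ k → sents.drop k = rest →
      (∀ x : String, PySem.Set.contains seen x
          = (sents.take k).any (fun prev => (subsA prev).any (fun p => x == p))) →
      (PySem.List.enumerate rest (k : Int)).foldl (aStep sents) out = cleanLoopB seen rest out := by
  intro rest
  induction rest with
  | nil =>
      intro k seen out _ _ _
      simp [PySem.List.enumerate_nil, cleanLoopB]
  | cons cur rest' ih =>
      intro k seen out hk hdrop hseen
      rw [PySem.List.enumerate_cons, List.foldl_cons, cleanLoopB]
      have hk0 : (k : Int) ≠ 0 := by omega
      have hslice : PySem.List.slice sents none (some (k : Int)) = sents.take k :=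
        PySem.List.slice_to_natCast sents k
      have hgetk : sents[k]? = some cur := by
        have : (sents.drop k)[0]? = some cur := by rw [hdrop]; rfl
        simpa using this
      -- the filtered lists agree
      have hfilter :
          (subsA cur).filter (fun sub =>
            ! (PySem.List.slice sents none (some (k : Int))).any (fun prev =>
                (subsA prev).any (fun p => sub == p)))
          = (subsB cur).filter (fun p => ! PySem.Set.contains seen p) := by
        rw [subsB_eq_subsA, hslice]
        exact List.filter_congr (fun x _ => by rw [hseen x])
      -- step outputs agree
      have hstep :
          aStep sents out ((k : Int), cur)
          = (if ((subsB cur).filter (fun p => ! PySem.Set.contains seen p)).isEmpty then out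
             else out ++ [PySem.Str.join ". " ((subsB cur).filter (fun p => ! PySem.Set.contains seen p)) ++ "."]) := by
        show aStep sents out ((k : Int), cur) = _
        rw [aStep]
        simp only [hk0, if_false]
        rw [hfilter]
        set fresh := (subsB cur).filter (fun p => ! PySem.Set.contains seen p) with hfreshdef
        have hne : ∀ p ∈ fresh, p ≠ "" := by
          intro p hp
          exact mem_subsA_ne_empty (s := cur) (by
            have := List.mem_of_mem_filter hp
            rwa [subsB_eq_subsA] at this)
        by_cases hf : fresh = []
        · simp [hf]
          decide
        · have hj : ¬ PySem.Str.join ". " fresh = "" := fun h => hf ((join_empty_iff hne).1 h)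
          simp [List.isEmpty_iff, hf, hj]
      rw [hstep]
      -- invariant for the next step
      have hdrop' : sents.drop (k + 1) = rest' := by
        have : (sents.drop k).drop 1 = sents.drop (k + 1) := by
          rw [List.drop_drop]
        rw [← this, hdrop]; rfl
      have htake' : sents.take (k + 1) = sents.take k ++ [cur] := by
        rw [List.take_succ, hgetk]; rfl
      have hseen' : ∀ x : String, PySem.Set.contains (PySem.Set.update seen (subsB cur)) x
          = (sents.take (k + 1)).any (fun prev => (subsA prev).any (fun p => x == p)) := by
        intro x
        rw [htake']
        rw [PySem.Set.contains_eq_decide]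
        have hmem : x ∈ PySem.Set.update seen (subsB cur) ↔ x ∈ seen ∨ x ∈ subsA cur := by
          rw [subsB_eq_subsA]; exact PySem.Set.mem_update seen (subsA cur) x
        have hseenx := hseen x
        rw [PySem.Set.contains_eq_decide] at hseenx
        simp only [List.any_append, List.any_cons, List.any_nil, Bool.or_false]
        rw [← hseenx]
        by_cases h1 : x ∈ seen <;> by_cases h2 : x ∈ subsA cur <;>
          simp [hmem, h1, h2, List.any_eq_true] <;>
          exact fun y hy hxy => h2 (hxy ▸ hy)
      have hres := ih (k + 1) (PySem.Set.update seen (subsB cur))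
        (if ((subsB cur).filter (fun p => ! PySem.Set.contains seen p)).isEmpty then out
         else out ++ [PySem.Str.join ". " ((subsB cur).filter (fun p => ! PySem.Set.contains seen p)) ++ "."])
        (by omega) hdrop' hseen'
      rw [Nat.cast_add, Nat.cast_one] at hres
      exact hres

-- ===== VERDICT (by name: the statement is the Claim_ definition above) =====
theorem clean_repeated_parts_spec : Claim_equal_clean_repeated_parts := by
  intro sentences _
  unfold Spec_clean_repeated_parts clean_repeated_parts clean_repeated_parts_alt
  cases hm : sentences.map (fun s => PySem.Str.lower (PySem.Str.strip s)) with
  | nil =>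
      show List.foldl (aStep []) [] (PySem.List.enumerate []) = ([] : List String)
      simp [PySem.List.enumerate_nil]
  | cons first rest =>
      show List.foldl (aStep (first :: rest)) [] (PySem.List.enumerate (first :: rest))
        = cleanLoopB (PySem.Set.ofList (subsB first)) rest [first]
      rw [PySem.List.enumerate_cons, List.foldl_cons]
      have hstep0 : aStep (first :: rest) [] ((0 : Int), first) = [first] := by
        rw [aStep]; simp
      rw [hstep0]
      have hseen0 : ∀ x : String,
          PySem.Set.contains (PySem.Set.ofList (subsB first)) x
          = ((first :: rest).take 1).any (fun prev => (subsA prev).any (fun p => x == p)) := by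
        intro x
        rw [PySem.Set.contains_eq_decide]
        have : x ∈ PySem.Set.ofList (subsB first) ↔ x ∈ subsA first := by
          rw [subsB_eq_subsA]; exact PySem.Set.mem_ofList (subsA first) x
        simp only [List.take_succ_cons, List.take_zero, List.any_cons, List.any_nil,
          Bool.or_false]
        by_cases h : x ∈ subsA first <;> simp [this, h, List.any_eq_true] <;>
          exact fun y hy hxy => h (hxy ▸ hy)
      have := loop_eq (first :: rest) rest 1 (PySem.Set.ofList (subsB first)) [first]
        (le_refl 1) rfl hseen0
      simpa using this
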